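-- pv_equiv track=rewrite | github.com/jtjun/SnuttleR | Chromosome.py | searchLongest
-- ===== SOURCE A (Python) =====
-- def searchLongest(a, lsts) :
--     M = -1
--     i = 0
--     while i < len(lsts) :
--         if a in lsts[i] :
--             if M < 0 : M = i
--             elif len(lsts[i]) > len(lsts[M]) : M = i
--         i += 1
--     return M
-- ===== SOURCE B (Python) =====
-- def searchLongest(a, lsts):
--     # Pass 1: aggregate — the maximal length among lists containing a.
--     best = max((len(l) for l in lsts if a in l), default=None)
--     if best is None:
--         return -1
--     # Pass 2: locate — the first index whose list attains that length and contains a.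
--     for i, l in enumerate(lsts):
--         if len(l) == best and a in l:
--             return i
-- ===== Notes on version B (the rewrite author's own statement) =====
-- stated objective: alternative
-- what changed: Replaces A's single running-argmax loop (which tracks a best index and re-reads its length for comparisons) by an aggregate-then-locate decomposition: first compute the maximal length among lists containing a, then a separate scan returns the first index attaining that length.
import Mathlib
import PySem

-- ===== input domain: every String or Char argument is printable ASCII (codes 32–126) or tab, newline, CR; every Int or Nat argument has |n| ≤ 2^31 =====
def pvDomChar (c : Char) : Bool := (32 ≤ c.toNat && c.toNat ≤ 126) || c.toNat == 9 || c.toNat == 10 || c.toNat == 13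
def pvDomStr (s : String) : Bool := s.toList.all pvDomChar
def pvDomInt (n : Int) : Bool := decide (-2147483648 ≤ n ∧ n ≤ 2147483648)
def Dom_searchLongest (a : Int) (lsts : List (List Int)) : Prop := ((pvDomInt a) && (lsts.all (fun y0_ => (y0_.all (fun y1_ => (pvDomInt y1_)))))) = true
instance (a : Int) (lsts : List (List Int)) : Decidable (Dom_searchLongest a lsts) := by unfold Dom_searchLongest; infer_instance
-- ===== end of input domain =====

-- B replaces A's running-argmax loop by an aggregate-then-locate decomposition
-- (max candidate length first, then first index attaining it); return values proved equal.


-- ===== PORT A =====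
-- while-loop over i = 0..len-1 with running best index M (getD [] is unreachable: i, M are in range)
def searchLongest (a : Int) (lsts : List (List Int)) : Int :=
  (PySem.List.pyRange 0 lsts.length 1).foldl
    (fun M i =>
      if a ∈ PySem.List.pyGetD lsts i [] then
        if M < 0 then i
        else if (PySem.List.pyGetD lsts i []).length > (PySem.List.pyGetD lsts M []).length then i
        else M
      else M)
    (-1)

-- ===== PORT B =====
-- max(gen, default=None): Python's builtin max is the running-max loop over the values
def pyMaxD : List Nat → Option Nat
  | [] => none
  | x :: t => some (t.foldl max x)

-- the lengths of the lists containing a, in order (the generator's values)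
def sLlens (a : Int) (lsts : List (List Int)) : List Nat :=
  (lsts.filter (fun l => decide (a ∈ l))).map List.length

-- the enumerate loop: first index i with len(lsts[i]) == best and a in lsts[i]
-- (the nil case is unreachable when best is attained; Python falls off returning None)
def sLfind (a : Int) (best : Nat) : Int → List (List Int) → Int
  | _, [] => -1
  | i, l :: rest => if l.length = best ∧ a ∈ l then i else sLfind a best (i + 1) rest

def searchLongest_alt (a : Int) (lsts : List (List Int)) : Int :=
  match pyMaxD (sLlens a lsts) with
  | none => -1
  | some best => sLfind a best 0 lsts

-- ===== PRECONDITION & SPEC =====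
def Spec_searchLongest (a : Int) (lsts : List (List Int)) (out : Int) : Prop := out = searchLongest_alt a lsts
instance (a : Int) (lsts : List (List Int)) (out : Int) : Decidable (Spec_searchLongest a lsts out) := by unfold Spec_searchLongest; infer_instance

-- ===== CLAIM =====
def Claim_equal_searchLongest : Prop := ∀ (a : Int) (lsts : List (List Int)), Dom_searchLongest a lsts → Spec_searchLongest a lsts (searchLongest a lsts)

-- ===== LEMMAS AND PROOFS =====

-- intermediate form of A's loop: structural recursion over the remaining lists,
-- carrying the running index i and (if any) the best index with its cached length
def recA (a : Int) : List (List Int) → Int → Option (Int × Nat) → Int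
  | [], _, acc => match acc with | none => -1 | some (m, _) => m
  | l :: rest, i, acc =>
    if a ∈ l then
      match acc with
      | none => recA a rest (i + 1) (some (i, l.length))
      | some (m, L) =>
          if l.length > L then recA a rest (i + 1) (some (i, l.length))
          else recA a rest (i + 1) (some (m, L))
    else recA a rest (i + 1) acc

theorem foldl_max_eq (t : List Nat) : ∀ (x : Nat),
    t.foldl max x = (match pyMaxD t with | none => x | some g => max x g) := by
  induction t with
  | nil => intro x; simp [pyMaxD]
  | cons y t ih =>
    intro x
    rw [List.foldl_cons, ih (max x y)]
    have hy : pyMaxD (y :: t) = some (t.foldl max y) := rfl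
    rw [hy, ih y]
    cases pyMaxD t with
    | none => simp only []
    | some g => simp only []; exact Nat.max_assoc x y g

theorem A_loop_eq (a : Int) (lsts : List (List Int)) :
    ∀ (d : List (List Int)) (k : Nat), lsts.drop k = d →
    ∀ (M : Int) (acc : Option (Int × Nat)),
    ((M = -1 ∧ acc = none) ∨
      (∃ L, acc = some (M, L) ∧ 0 ≤ M ∧ (PySem.List.pyGetD lsts M []).length = L)) →
    (PySem.List.pyRange (k : Int) (lsts.length : Int) 1).foldl
      (fun M i =>
        if a ∈ PySem.List.pyGetD lsts i [] then
          if M < 0 then i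
          else if (PySem.List.pyGetD lsts i []).length > (PySem.List.pyGetD lsts M []).length then i
          else M
        else M) M
    = recA a d (k : Int) acc := by
  intro d
  induction d with
  | nil =>
    intro k hk M acc hinv
    have hk' : lsts.length ≤ k := by
      by_contra h
      have := List.drop_eq_nil_iff.mp hk
      omega
    rw [PySem.List.pyRange_one_eq_nil (by exact_mod_cast hk')]
    rcases hinv with ⟨rfl, rfl⟩ | ⟨L, rfl, _, _⟩ <;> simp [recA]
  | cons l rest ih =>
    intro k hk M acc hinv
    have hklt : k < lsts.length := by
      by_contra h
      rw [List.drop_eq_nil_iff.mpr (by omega)] at hk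
      simp at hk
    have hget : lsts[k]? = some l := by
      have h0 : (lsts.drop k)[0]? = some l := by rw [hk]; rfl
      rw [List.getElem?_drop] at h0
      simpa using h0
    have hgetD : PySem.List.pyGetD lsts (k : Int) [] = l := by
      rw [PySem.List.pyGetD_natCast]
      simp [List.getD, hget]
    have hdrop : lsts.drop (k + 1) = rest := by
      have h1 : List.drop 1 (List.drop k lsts) = List.drop (k + 1) lsts := List.drop_drop
      rw [← h1, hk]; rfl
    rw [PySem.List.pyRange_one_cons (by exact_mod_cast hklt), List.foldl_cons]
    have hcast : (k : Int) + 1 = ((k + 1 : Nat) : Int) := by push_cast; ring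
    by_cases hmem : a ∈ l
    · rcases hinv with ⟨rfl, rfl⟩ | ⟨L, rfl, hM0, hLen⟩
      · rw [if_pos (hgetD ▸ hmem), if_pos (by norm_num)]
        simp only [recA, if_pos hmem]
        rw [hcast]
        exact ih (k + 1) hdrop _ _ (Or.inr ⟨l.length, rfl, by positivity, by rw [hgetD]⟩)
      · rw [if_pos (hgetD ▸ hmem), if_neg (by omega)]
        simp only [recA, if_pos hmem]
        rw [hgetD, hLen]
        by_cases hgt : l.length > L
        · rw [if_pos hgt, if_pos hgt, hcast]
          exact ih (k + 1) hdrop _ _ (Or.inr ⟨l.length, rfl, by positivity, by rw [hgetD]⟩)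
        · rw [if_neg hgt, if_neg hgt, hcast]
          exact ih (k + 1) hdrop _ _ (Or.inr ⟨L, rfl, hM0, hLen⟩)
    · rw [if_neg (hgetD ▸ hmem)]
      simp only [recA, if_neg hmem]
      rw [hcast]
      exact ih (k + 1) hdrop _ _ hinv

theorem recA_some (a : Int) (lsts : List (List Int)) :
    ∀ (i m : Int) (L : Nat),
    recA a lsts i (some (m, L)) =
      (match pyMaxD (sLlens a lsts) with
       | none => m
       | some b => if L < b then sLfind a b i lsts else m) := by
  induction lsts with
  | nil => intro i m L; simp [recA, sLlens, pyMaxD]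
  | cons l rest ih =>
    intro i m L
    by_cases hmem : a ∈ l
    · have hlens : sLlens a (l :: rest) = l.length :: sLlens a rest := by
        simp [sLlens, hmem]
      simp only [recA, if_pos hmem]
      cases hr : pyMaxD (sLlens a rest) with
      | none =>
        have hmax : pyMaxD (sLlens a (l :: rest)) = some l.length := by
          rw [hlens]
          have : pyMaxD (l.length :: sLlens a rest) = some ((sLlens a rest).foldl max l.length) := rfl
          rw [this, foldl_max_eq, hr]
        rw [hmax]
        by_cases hgt : l.length > L
        · rw [if_pos hgt, ih, hr]
          simp only []
          rw [if_pos hgt]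
          simp [sLfind, hmem]
        · rw [if_neg hgt, ih, hr]
          simp only []
          rw [if_neg (by omega)]
      | some g =>
        have hmax : pyMaxD (sLlens a (l :: rest)) = some (max l.length g) := by
          rw [hlens]
          have : pyMaxD (l.length :: sLlens a rest) = some ((sLlens a rest).foldl max l.length) := rfl
          rw [this, foldl_max_eq, hr]
        rw [hmax]
        by_cases hgt : l.length > L
        · rw [if_pos hgt, ih, hr]
          simp only []
          rw [if_pos (lt_max_iff.mpr (Or.inl hgt))]
          by_cases hlg : g ≤ l.length
          · rw [Nat.max_eq_left hlg, if_neg (by omega)]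
            simp [sLfind, hmem]
          · rw [Nat.max_eq_right (by omega), if_pos (by omega)]
            simp only [sLfind]
            rw [if_neg (fun h : l.length = g ∧ a ∈ l => absurd h.1 (by omega))]
        · rw [if_neg hgt, ih, hr]
          simp only []
          by_cases hLb : L < max l.length g
          · have hgL : L < g := by
              rcases lt_max_iff.mp hLb with h | h <;> omega
            rw [if_pos hLb, if_pos hgL, Nat.max_eq_right (by omega)]
            simp only [sLfind]
            rw [if_neg (fun h : l.length = g ∧ a ∈ l => absurd h.1 (by omega))]
          · have hgL : ¬ L < g := fun h => hLb (lt_max_iff.mpr (Or.inr h))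
            rw [if_neg hLb, if_neg hgL]
    · have hlens : sLlens a (l :: rest) = sLlens a rest := by
        simp [sLlens, hmem]
      simp only [recA, if_neg hmem]
      rw [hlens, ih]
      cases pyMaxD (sLlens a rest) with
      | none => rfl
      | some g =>
        simp only []
        by_cases hLg : L < g
        · rw [if_pos hLg, if_pos hLg]
          simp only [sLfind]
          rw [if_neg (fun h : l.length = _ ∧ a ∈ l => hmem h.2)]
        · rw [if_neg hLg, if_neg hLg]

theorem recA_none (a : Int) (lsts : List (List Int)) :
    ∀ (i : Int),
    recA a lsts i none =
      (match pyMaxD (sLlens a lsts) with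
       | none => -1
       | some b => sLfind a b i lsts) := by
  induction lsts with
  | nil => intro i; simp [recA, sLlens, pyMaxD]
  | cons l rest ih =>
    intro i
    by_cases hmem : a ∈ l
    · have hlens : sLlens a (l :: rest) = l.length :: sLlens a rest := by
        simp [sLlens, hmem]
      simp only [recA, if_pos hmem]
      rw [recA_some]
      cases hr : pyMaxD (sLlens a rest) with
      | none =>
        have hmax : pyMaxD (sLlens a (l :: rest)) = some l.length := by
          rw [hlens]
          have : pyMaxD (l.length :: sLlens a rest) = some ((sLlens a rest).foldl max l.length) := rfl
          rw [this, foldl_max_eq, hr]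
        rw [hmax]
        simp [sLfind, hmem]
      | some g =>
        have hmax : pyMaxD (sLlens a (l :: rest)) = some (max l.length g) := by
          rw [hlens]
          have : pyMaxD (l.length :: sLlens a rest) = some ((sLlens a rest).foldl max l.length) := rfl
          rw [this, foldl_max_eq, hr]
        rw [hmax]
        simp only []
        by_cases hlg : l.length < g
        · rw [if_pos hlg, Nat.max_eq_right (by omega)]
          simp only [sLfind]
          rw [if_neg (fun h : l.length = g ∧ a ∈ l => absurd h.1 (by omega))]
        · rw [if_neg hlg, Nat.max_eq_left (by omega)]
          simp [sLfind, hmem]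
    · have hlens : sLlens a (l :: rest) = sLlens a rest := by
        simp [sLlens, hmem]
      simp only [recA, if_neg hmem]
      rw [hlens, ih]
      cases pyMaxD (sLlens a rest) with
      | none => rfl
      | some g =>
        simp only [sLfind]
        rw [if_neg (fun h : l.length = _ ∧ a ∈ l => hmem h.2)]

-- ===== VERDICT =====
theorem searchLongest_spec : Claim_equal_searchLongest := by
  intro a lsts _
  unfold Spec_searchLongest searchLongest searchLongest_alt
  have h := A_loop_eq a lsts lsts 0 rfl (-1) none (Or.inl ⟨rfl, rfl⟩)
  rw [recA_none] at h
  simpa using h
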